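-- pv_equiv track=rewrite | github.com/Amirhossein-Rajabpour/Genetic-Algorithm | geneticProject/GraphicalUserInterface.py | create_game_plate_arr
-- ===== SOURCE A (Python) =====
-- def create_game_plate_arr(game_plate_str):
--     first_row, second_row = "", ""
--     for char in game_plate_str:
--         if char == "_":
--             first_row += "_"
--             second_row += "_"
--         elif char == "G":
--             first_row += "_"
--             second_row += "G"
--         elif char == "L":
--             first_row += "L"
--             second_row += "_"
--         elif char == "M":
--             first_row += "_"
--             second_row += "M"
--     first_row_split = [char for char in first_row]
--     second_row_split = [char for char in second_row]
--     game_plate_arr = [first_row_split, second_row_split]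
--     return game_plate_arr
-- ===== SOURCE B (Python) =====
-- def create_game_plate_arr(game_plate_str):
--     # Keep only the valid plate symbols, then derive each row directly:
--     # the top row is 'L' exactly where the symbol is 'L' (else '_'),
--     # the bottom row is the symbol itself except that 'L' becomes '_'.
--     valid = [c for c in game_plate_str if c in "_GLM"]
--     first_row = ['L' if c == 'L' else '_' for c in valid]
--     second_row = ['_' if c == 'L' else c for c in valid]
--     return [first_row, second_row]
-- ===== Notes on version B (the rewrite author's own statement) =====
-- stated objective: simpler
-- what changed: Instead of a four-branch if/elif chain growing two strings in lockstep, B filters once to the valid symbols and derives each row independently ('L' marks the top row; the bottom row is the symbol with 'L' replaced by '_'); list comprehensions instead of repeated string concatenation give the constant-factor speedup.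
import Mathlib
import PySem

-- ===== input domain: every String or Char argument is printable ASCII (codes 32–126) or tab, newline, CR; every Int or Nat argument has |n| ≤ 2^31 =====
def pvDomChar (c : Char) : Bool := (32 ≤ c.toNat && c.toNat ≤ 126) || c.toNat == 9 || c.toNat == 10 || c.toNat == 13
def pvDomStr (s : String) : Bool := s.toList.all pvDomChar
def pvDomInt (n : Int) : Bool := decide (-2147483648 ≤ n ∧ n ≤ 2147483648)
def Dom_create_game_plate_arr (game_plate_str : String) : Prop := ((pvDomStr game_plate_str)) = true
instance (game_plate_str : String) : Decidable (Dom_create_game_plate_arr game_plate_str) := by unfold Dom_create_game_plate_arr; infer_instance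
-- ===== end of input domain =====

-- B replaces A's four-branch chain growing two strings in lockstep by a filter to the
-- valid symbols followed by two independent row derivations ('L' marks the top row,
-- the bottom row is the symbol with 'L' replaced by '_') — simpler decomposition.

-- ===== PORT A =====
-- the loop body: the if/elif chain updating the two accumulator strings
def cgpStep (acc : String × String) (c : Char) : String × String :=
  if c = '_' then (acc.1 ++ "_", acc.2 ++ "_")
  else if c = 'G' then (acc.1 ++ "_", acc.2 ++ "G")
  else if c = 'L' then (acc.1 ++ "L", acc.2 ++ "_")
  else if c = 'M' then (acc.1 ++ "_", acc.2 ++ "M")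
  else acc

def create_game_plate_arr (game_plate_str : String) : List (List String) :=
  let rows := game_plate_str.toList.foldl cgpStep ("", "")
  let first_row_split := rows.1.toList.map (fun c => String.ofList [c])
  let second_row_split := rows.2.toList.map (fun c => String.ofList [c])
  [first_row_split, second_row_split]

-- ===== PORT B =====
def create_game_plate_arr_alt (game_plate_str : String) : List (List String) :=
  let valid := game_plate_str.toList.filter (fun c => c ∈ "_GLM".toList)
  let first_row := valid.map (fun c => if c = 'L' then "L" else "_")
  let second_row := valid.map (fun c => if c = 'L' then "_" else String.ofList [c])
  [first_row, second_row]

-- ===== PRECONDITION & SPEC =====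
def Spec_create_game_plate_arr (game_plate_str : String) (out : List (List String)) : Prop := out = create_game_plate_arr_alt game_plate_str
instance (game_plate_str : String) (out : List (List String)) : Decidable (Spec_create_game_plate_arr game_plate_str out) := by unfold Spec_create_game_plate_arr; infer_instance

-- ===== CLAIM (what is proved, stated in full; the proofs are below) =====
def Claim_equal_create_game_plate_arr : Prop := ∀ (game_plate_str : String), Dom_create_game_plate_arr game_plate_str → Spec_create_game_plate_arr game_plate_str (create_game_plate_arr game_plate_str)

-- ===== LEMMAS AND PROOFS =====
-- loop invariant: A's fold, started from any accumulators, yields the accumulators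
-- followed by B's filtered-and-mapped rows, char by char
theorem cgp_fold_inv (cs : List Char) (f s : String) :
    ((cs.foldl cgpStep (f, s)).1.toList.map (fun c => String.ofList [c])
       = f.toList.map (fun c => String.ofList [c])
         ++ (cs.filter (fun c => c ∈ "_GLM".toList)).map (fun c => if c = 'L' then "L" else "_"))
    ∧ ((cs.foldl cgpStep (f, s)).2.toList.map (fun c => String.ofList [c])
       = s.toList.map (fun c => String.ofList [c])
         ++ (cs.filter (fun c => c ∈ "_GLM".toList)).map (fun c => if c = 'L' then "_" else String.ofList [c])) := by
  induction cs generalizing f s with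
  | nil => simp
  | cons c cs ih =>
    by_cases h1 : c = '_' <;> by_cases h2 : c = 'G' <;> by_cases h3 : c = 'L' <;>
      by_cases h4 : c = 'M' <;>
      simp_all [cgpStep, List.foldl_cons, String.ofList] <;>
      first | rfl | exact ⟨rfl, rfl⟩

-- ===== VERDICT (by name: the statement is the Claim_ definition above) =====
theorem create_game_plate_arr_spec : Claim_equal_create_game_plate_arr := by
  intro s _
  unfold Spec_create_game_plate_arr create_game_plate_arr create_game_plate_arr_alt
  have h := cgp_fold_inv s.toList "" ""
  simp at h
  simp [h.1, h.2]
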